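-- pv_equiv track=rewrite | github.com/OrderAndCh4oS/filter-out-lowest-value-duplicates | scripts.py | RoadRunner
-- ===== SOURCE A (Python) =====
-- from operator import itemgetter
--
-- def RoadRunner(arr):
--     unique = {}
--     arr = sorted(arr, key=itemgetter('T'))
--     for dic in arr:
--         key = dic['T']
--         found = unique.get(key)
--
--         # If value found and doesn't exceed current maximum, just ignore
--         if found and dic['V'] <= found['V']:
--             continue
--
--         # otherwise just update normally
--         unique[key] = dic
--
--     return list(unique.values())
-- ===== SOURCE B (Python) =====
-- def RoadRunner(arr):
--     keys = sorted({dic['T'] for dic in arr})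
--     result = []
--     for key in keys:
--         best = None
--         for dic in arr:
--             if dic['T'] == key and (best is None or dic['V'] > best['V']):
--                 best = dic
--         result.append(best)
--     return result
-- ===== Notes on version B (the rewrite author's own statement) =====
-- stated objective: alternative
-- what changed: B uses no dict at all: it collects the distinct 'T' keys as a sorted set and then, per key, does a plain linear max-scan over the original array (earliest entry wins V-ties), instead of A's sort-the-whole-array-then-fold-into-a-dict relying on insertion order.
import Mathlib
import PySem

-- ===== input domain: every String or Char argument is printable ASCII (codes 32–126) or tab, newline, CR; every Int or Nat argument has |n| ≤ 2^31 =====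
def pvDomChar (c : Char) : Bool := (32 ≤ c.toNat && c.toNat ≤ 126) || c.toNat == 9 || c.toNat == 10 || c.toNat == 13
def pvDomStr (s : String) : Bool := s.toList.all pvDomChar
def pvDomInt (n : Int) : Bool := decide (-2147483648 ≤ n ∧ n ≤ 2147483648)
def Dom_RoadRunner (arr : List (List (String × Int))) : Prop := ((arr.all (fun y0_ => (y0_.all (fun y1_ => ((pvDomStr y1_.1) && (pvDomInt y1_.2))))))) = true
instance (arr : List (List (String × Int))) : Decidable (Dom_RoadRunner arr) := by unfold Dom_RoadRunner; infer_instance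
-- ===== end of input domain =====

-- B drops the dict entirely: it sorts the set of distinct 'T' keys and does a per-key
-- linear max-scan over the original array (earliest entry wins V-ties); return values proved equal.

-- ===== PORT A =====
-- dic['T'] / dic['V'] of one entry (total via getD 0; Pre_ guarantees the key is present wherever it is read)
def pvKeyT (d : List (String × Int)) : Int := ((PySem.Dict.mk d).get? "T").getD 0
def pvValV (d : List (String × Int)) : Int := ((PySem.Dict.mk d).get? "V").getD 0

def RoadRunner (arr : List (List (String × Int))) : List (List (String × Int)) :=
  let arr' := PySem.List.sorted arr pvKeyT
  let unique := arr'.foldl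
    (fun (u : PySem.Dict Int (List (String × Int))) dic =>
      let key := pvKeyT dic
      match u.get? key with
      | some found =>
          -- 'if found and dic['V'] <= found['V']: continue'
          if found ≠ [] ∧ pvValV dic ≤ pvValV found then u
          else u.insert key dic
      | none => u.insert key dic)
    PySem.Dict.empty
  unique.values

-- ===== PORT B =====
def RoadRunner_alt (arr : List (List (String × Int))) : List (List (String × Int)) :=
  let keys := PySem.List.sorted (PySem.Set.ofList (arr.map pvKeyT)) (fun k => k)
  keys.foldl
    (fun result key =>
      let best := arr.foldl
        (fun (best : Option (List (String × Int))) dic =>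
          -- 'if dic['T'] == key and (best is None or dic['V'] > best['V']): best = dic'
          if pvKeyT dic = key then
            match best with
            | none => some dic
            | some b => if pvValV b < pvValV dic then some dic else best
          else best)
        none
      -- best is some entry of arr since key occurs in arr; getD makes the append total
      result ++ [best.getD []])
    []

-- ===== PRECONDITION & SPEC =====
-- Exactly the inputs on which the Python A returns (KeyError otherwise): every entry has a
-- 'T' key, and every entry whose 'T' value occurs in at least two entries also has a 'V' key
-- (an entry that is alone with its 'T' never has its 'V' read).
def Pre_RoadRunner (arr : List (List (String × Int))) : Prop :=
  ∀ d ∈ arr, ((PySem.Dict.mk d).get? "T").isSome = true ∧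
    (2 ≤ (arr.map pvKeyT).count (pvKeyT d) → ((PySem.Dict.mk d).get? "V").isSome = true)
instance (arr : List (List (String × Int))) : Decidable (Pre_RoadRunner arr) := by
  unfold Pre_RoadRunner; infer_instance

def pvWitness_RoadRunner : (List (List (String × Int))) := [[("T", 1), ("V", 2)], [("T", 1), ("V", 3)], [("T", 0), ("V", 5)]]

def Spec_RoadRunner (arr : List (List (String × Int))) (out : List (List (String × Int))) : Prop := out = RoadRunner_alt arr
instance (arr : List (List (String × Int))) (out : List (List (String × Int))) : Decidable (Spec_RoadRunner arr out) := by unfold Spec_RoadRunner; infer_instance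

-- ===== CLAIM (what is proved, stated in full; the proofs are below) =====
def Claim_equal_RoadRunner : Prop := ∀ (arr : List (List (String × Int))), Dom_RoadRunner arr → Pre_RoadRunner arr → Spec_RoadRunner arr (RoadRunner arr)

-- ===== LEMMAS AND PROOFS =====

def rrStep (u : PySem.Dict Int (List (String × Int))) (dic : List (String × Int)) : PySem.Dict Int (List (String × Int)) :=
  match u.get? (pvKeyT dic) with
  | some cur => if pvValV cur < pvValV dic then u.insert (pvKeyT dic) dic else u
  | none => u.insert (pvKeyT dic) dic
def updV (o : Option (List (String × Int))) (d : List (String × Int)) : Option (List (String × Int)) :=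
  match o with
  | none => some d
  | some c => if pvValV c < pvValV d then some d else some c
def selStep (k : Int) (o : Option (List (String × Int))) (d : List (String × Int)) : Option (List (String × Int)) :=
  if pvKeyT d = k then updV o d else o
theorem get?_rrStep (u : PySem.Dict Int (List (String × Int))) (d : List (String × Int)) (k : Int) :
    (rrStep u d).get? k = selStep k (u.get? k) d := by
  unfold rrStep selStep updV
  by_cases hk : pvKeyT d = k
  · subst hk
    cases h : u.get? (pvKeyT d) with
    | none => simp [h, PySem.Dict.get?_insert]
    | some c =>
      simp only [h]
      by_cases hv : pvValV c < pvValV d <;> simp [hv, h, PySem.Dict.get?_insert]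
  · have hk' : ¬ k = pvKeyT d := fun hh => hk hh.symm
    cases h : u.get? (pvKeyT d) with
    | none => simp [PySem.Dict.get?_insert, hk, hk']
    | some c =>
      by_cases hv : pvValV c < pvValV d <;> simp [hv, hk, PySem.Dict.get?_insert, hk']

def selK (k : Int) (o : Option (List (String × Int))) (l : List (List (String × Int))) : Option (List (String × Int)) :=
  l.foldl (selStep k) o

def fkeysStep (ks : List Int) (d : List (String × Int)) : List Int :=
  if pvKeyT d ∈ ks then ks else ks ++ [pvKeyT d]

theorem get?_foldl_rrStep (l : List (List (String × Int))) :
    ∀ (u : PySem.Dict Int (List (String × Int))) (k : Int),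
      (l.foldl rrStep u).get? k = selK k (u.get? k) l := by
  induction l with
  | nil => intro u k; rfl
  | cons d t ih =>
    intro u k
    simp only [List.foldl_cons, selK, ih (rrStep u d) k, get?_rrStep]

theorem keys_rrStep (u : PySem.Dict Int (List (String × Int))) (d : List (String × Int)) :
    (rrStep u d).keys = fkeysStep u.keys d := by
  unfold rrStep fkeysStep
  cases h : u.get? (pvKeyT d) with
  | none =>
    have hc : u.contains (pvKeyT d) = false := by
      rw [PySem.Dict.contains_eq_isSome_get?, h]; rfl
    have hm : pvKeyT d ∉ u.keys := by
      rw [← PySem.Dict.contains_iff_mem_keys]; simp [hc]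
    rw [PySem.Dict.keys_insert_of_not_contains u d hc, if_neg hm]
  | some c =>
    have hc : u.contains (pvKeyT d) = true := by
      rw [PySem.Dict.contains_eq_isSome_get?, h]; rfl
    have hm : pvKeyT d ∈ u.keys := by
      rw [← PySem.Dict.contains_iff_mem_keys]; simp [hc]
    by_cases hv : pvValV c < pvValV d <;>
      simp [hv, hm, PySem.Dict.keys_insert_of_contains u d hc]

theorem keys_foldl_rrStep (l : List (List (String × Int))) :
    ∀ (u : PySem.Dict Int (List (String × Int))),
      (l.foldl rrStep u).keys = l.foldl fkeysStep u.keys := by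
  induction l with
  | nil => intro u; rfl
  | cons d t ih => intro u; simp only [List.foldl_cons, ih (rrStep u d), keys_rrStep]

theorem nodup_foldl_fkeysStep (l : List (List (String × Int))) :
    ∀ (ks : List Int), ks.Nodup → (l.foldl fkeysStep ks).Nodup := by
  induction l with
  | nil => intro ks h; exact h
  | cons d t ih =>
    intro ks h
    simp only [List.foldl_cons]
    apply ih
    unfold fkeysStep
    by_cases hm : pvKeyT d ∈ ks
    · simp [hm, h]
    · rw [if_neg hm]
      exact h.append (List.nodup_singleton _) (by simpa [List.disjoint_singleton] using hm)

theorem mem_foldl_fkeysStep (l : List (List (String × Int))) :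
    ∀ (ks : List Int) (k : Int), k ∈ l.foldl fkeysStep ks ↔ k ∈ ks ∨ k ∈ l.map pvKeyT := by
  induction l with
  | nil => intro ks k; simp
  | cons d t ih =>
    intro ks k
    simp only [List.foldl_cons, ih, List.map_cons, List.mem_cons]
    unfold fkeysStep
    by_cases hm : pvKeyT d ∈ ks
    · simp [hm]
      constructor
      · rintro (h | h)
        · exact Or.inl h
        · exact Or.inr (Or.inr h)
      · rintro (h | h | h)
        · exact Or.inl h
        · subst h; exact Or.inl hm
        · exact Or.inr h
    · rw [if_neg hm]
      simp only [List.mem_append, List.mem_singleton]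
      tauto

theorem pairwise_foldl_fkeysStep (l : List (List (String × Int))) :
    ∀ (ks : List Int), ks.Pairwise (· < ·) → (∀ a ∈ ks, ∀ d ∈ l, a ≤ pvKeyT d) →
      (l.map pvKeyT).Pairwise (· ≤ ·) → (l.foldl fkeysStep ks).Pairwise (· < ·) := by
  induction l with
  | nil => intro ks h _ _; exact h
  | cons d t ih =>
    intro ks hks hle hpw
    simp only [List.map_cons, List.pairwise_cons] at hpw
    simp only [List.foldl_cons]
    apply ih
    · unfold fkeysStep
      by_cases hm : pvKeyT d ∈ ks
      · simpa [hm] using hks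
      · rw [if_neg hm]
        rw [List.pairwise_append]
        refine ⟨hks, by simp, ?_⟩
        intro a ha b hb
        simp only [List.mem_singleton] at hb
        subst hb
        have h1 : a ≤ pvKeyT d := hle a ha d (by simp)
        have h2 : a ≠ pvKeyT d := fun hh => hm (hh ▸ ha)
        omega
    · intro a ha e he
      unfold fkeysStep at ha
      by_cases hm : pvKeyT d ∈ ks
      · simp only [hm, if_pos] at ha
        exact hle a ha e (by simp [he])
      · rw [if_neg hm] at ha
        rw [List.mem_append, List.mem_singleton] at ha
        rcases ha with ha | ha
        · exact hle a ha e (by simp [he])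
        · subst ha
          exact hpw.1 (pvKeyT e) (List.mem_map_of_mem he)
    · exact hpw.2

theorem filter_insertBy (k : Int) (x : List (String × Int)) (acc : List (List (String × Int)))
    (h : acc.Pairwise (fun a b => pvKeyT a ≤ pvKeyT b)) :
    (PySem.List.insertBy (fun a b => decide (pvKeyT a < pvKeyT b)) x acc).filter (fun d => pvKeyT d == k)
      = if pvKeyT x = k then acc.filter (fun d => pvKeyT d == k) ++ [x]
        else acc.filter (fun d => pvKeyT d == k) := by
  induction acc with
  | nil =>
    simp only [PySem.List.insertBy, List.filter]
    by_cases hk : pvKeyT x = k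
    · have hb : (pvKeyT x == k) = true := by simp [hk]
      simp [hb, hk]
    · have hb : (pvKeyT x == k) = false := by simp [hk]
      simp [hb, hk]
  | cons y ys ih =>
    simp only [PySem.List.insertBy]
    by_cases hlt : pvKeyT x < pvKeyT y
    · simp only [hlt, decide_true, if_true]
      by_cases hk : pvKeyT x = k
      · have hnil : (y :: ys).filter (fun d => pvKeyT d == k) = [] := by
          rw [List.filter_eq_nil_iff]
          intro a ha
          have hya : pvKeyT y ≤ pvKeyT a := by
            rcases ha with _ | hmem
            · exact le_refl _
            · exact (List.pairwise_cons.mp h).1 a (by assumption)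
          simp only [beq_iff_eq]
          omega
        simp [List.filter_cons, beq_iff_eq, hk, hnil]
      · simp [List.filter_cons, beq_iff_eq, hk]
    · simp only [hlt, decide_false, if_false]
      have ih' := ih (List.pairwise_cons.mp h).2
      by_cases hk : pvKeyT x = k <;> by_cases hy : pvKeyT y = k <;>
        simp [List.filter_cons, beq_iff_eq, hk, hy, ih']

theorem pairwise_insertBy (x : List (String × Int)) (acc : List (List (String × Int)))
    (h : acc.Pairwise (fun a b => pvKeyT a ≤ pvKeyT b)) :
    (PySem.List.insertBy (fun a b => decide (pvKeyT a < pvKeyT b)) x acc).Pairwise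
      (fun a b => pvKeyT a ≤ pvKeyT b) := by
  induction acc with
  | nil => simp [PySem.List.insertBy]
  | cons y ys ih =>
    simp only [PySem.List.insertBy]
    by_cases hlt : pvKeyT x < pvKeyT y
    · simp only [hlt, decide_true, if_true]
      rw [List.pairwise_cons]
      refine ⟨?_, h⟩
      intro a ha
      rcases ha with _ | hmem
      · omega
      · have := (List.pairwise_cons.mp h).1 a (by assumption)
        omega
    · simp only [hlt, decide_false, Bool.false_eq_true, if_false]
      rw [List.pairwise_cons]
      obtain ⟨hy, hys⟩ := List.pairwise_cons.mp h
      refine ⟨?_, ih hys⟩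
      intro a ha
      rw [PySem.List.mem_insertBy] at ha
      rcases ha with rfl | hmem
      · omega
      · exact hy a hmem

theorem filter_foldl_insertBy (k : Int) (l : List (List (String × Int))) :
    ∀ (acc : List (List (String × Int))), acc.Pairwise (fun a b => pvKeyT a ≤ pvKeyT b) →
      (l.foldl (fun acc x => PySem.List.insertBy (fun a b => decide (pvKeyT a < pvKeyT b)) x acc) acc).filter
          (fun d => pvKeyT d == k)
        = acc.filter (fun d => pvKeyT d == k) ++ l.filter (fun d => pvKeyT d == k) := by
  induction l with
  | nil => intro acc _; simp
  | cons x t ih =>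
    intro acc hacc
    simp only [List.foldl_cons]
    rw [ih _ (pairwise_insertBy x acc hacc), filter_insertBy k x acc hacc]
    by_cases hk : pvKeyT x = k
    · have hb : (pvKeyT x == k) = true := by simp [hk]
      simp [hk, hb]
    · have hb : (pvKeyT x == k) = false := by simp [hk]
      simp [hk, hb]

theorem filter_sorted_stable (k : Int) (l : List (List (String × Int))) :
    (PySem.List.sorted l pvKeyT).filter (fun d => pvKeyT d == k) = l.filter (fun d => pvKeyT d == k) := by
  rw [PySem.List.sorted_eq_foldl_insertBy]
  simpa using filter_foldl_insertBy k l [] (by simp)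

theorem selK_eq_filter (k : Int) (l : List (List (String × Int))) :
    ∀ (o : Option (List (String × Int))), selK k o l = (l.filter (fun d => pvKeyT d == k)).foldl updV o := by
  induction l with
  | nil => intro o; rfl
  | cons d t ih =>
    intro o
    simp only [selK, List.foldl_cons] at *
    by_cases hk : pvKeyT d = k
    · have hb : (pvKeyT d == k) = true := by simp [hk]
      rw [List.filter_cons, hb]
      simp only [if_true, List.foldl_cons]
      rw [← ih]
      simp [selStep, hk]
    · have hb : (pvKeyT d == k) = false := by simp [hk]
      rw [List.filter_cons, hb]
      simp only [if_false, Bool.false_eq_true]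
      rw [← ih]
      simp [selStep, hk]

theorem selK_sorted (k : Int) (l : List (List (String × Int))) :
    selK k none (PySem.List.sorted l pvKeyT) = selK k none l := by
  rw [selK_eq_filter, selK_eq_filter, filter_sorted_stable]

def goodU (u : PySem.Dict Int (List (String × Int))) : Prop := ∀ p ∈ u.items, p.2 ≠ ([] : List (String × Int))

theorem good_rrStep (u : PySem.Dict Int (List (String × Int))) (d : List (String × Int))
    (hd : d ≠ []) (hu : goodU u) : goodU (rrStep u d) := by
  unfold rrStep
  have hins : goodU (u.insert (pvKeyT d) d) := by
    intro p hp
    rcases (PySem.Dict.mem_items_insert u (pvKeyT d) d p).mp hp with rfl | ⟨hp', _⟩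
    · exact hd
    · exact hu p hp'
  cases h : u.get? (pvKeyT d) with
  | none => exact hins
  | some c =>
    show goodU (if pvValV c < pvValV d then u.insert (pvKeyT d) d else u)
    split_ifs <;> [exact hins; exact hu]

theorem stepA_eq_rrStep (u : PySem.Dict Int (List (String × Int))) (d : List (String × Int))
    (hu : goodU u) :
    (match u.get? (pvKeyT d) with
      | some found => if found ≠ [] ∧ pvValV d ≤ pvValV found then u else u.insert (pvKeyT d) d
      | none => u.insert (pvKeyT d) d) = rrStep u d := by
  unfold rrStep
  cases h : u.get? (pvKeyT d) with
  | none => rfl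
  | some c =>
    have hc : c ≠ [] := hu (pvKeyT d, c) (PySem.Dict.mem_items_of_get?_eq_some u h)
    simp only [hc, ne_eq, not_false_eq_true, true_and]
    split_ifs with h1 h2 <;> first | rfl | omega

theorem foldA_eq_foldl_rrStep (l : List (List (String × Int))) :
    ∀ (u : PySem.Dict Int (List (String × Int))), (∀ d ∈ l, d ≠ []) → goodU u →
      l.foldl (fun u dic =>
          let key := pvKeyT dic
          match u.get? key with
          | some found => if found ≠ [] ∧ pvValV dic ≤ pvValV found then u else u.insert key dic
          | none => u.insert key dic) u
        = l.foldl rrStep u := by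
  induction l with
  | nil => intro u _ _; rfl
  | cons d t ih =>
    intro u hl hu
    simp only [List.foldl_cons]
    rw [stepA_eq_rrStep u d hu]
    exact ih (rrStep u d) (fun e he => hl e (by simp [he]))
      (good_rrStep u d (hl d (by simp)) hu)

theorem hasT_ne_nil (d : List (String × Int)) (h : ((PySem.Dict.mk d).get? "T").isSome = true) :
    d ≠ [] := by
  intro hnil
  subst hnil
  simp [PySem.Dict.get?] at h

theorem values_foldl_rrStep (l : List (List (String × Int))) :
    (l.foldl rrStep PySem.Dict.empty).values
      = (l.foldl fkeysStep []).map (fun k => (selK k none l).getD []) := by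
  have hkeys : (l.foldl rrStep PySem.Dict.empty).keys = l.foldl fkeysStep [] := by
    rw [keys_foldl_rrStep]; rfl
  have hnd : (l.foldl rrStep PySem.Dict.empty).keys.Nodup := by
    rw [hkeys]; exact nodup_foldl_fkeysStep l [] (List.nodup_nil)
  rw [PySem.Dict.values_eq_map_keys _ hnd [], hkeys]
  apply List.map_congr_left
  intro k hk
  rw [PySem.Dict.getD_eq_get?_getD, get?_foldl_rrStep]
  rfl

theorem goodU_empty : goodU (PySem.Dict.empty : PySem.Dict Int (List (String × Int))) := by
  intro p hp
  simp [PySem.Dict.empty] at hp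

theorem RoadRunner_eq_canon (arr : List (List (String × Int))) (h : ∀ d ∈ arr, d ≠ []) :
    RoadRunner arr = ((PySem.List.sorted arr pvKeyT).foldl fkeysStep []).map
      (fun k => (selK k none arr).getD []) := by
  unfold RoadRunner
  show ((PySem.List.sorted arr pvKeyT).foldl
      (fun (u : PySem.Dict Int (List (String × Int))) dic =>
        let key := pvKeyT dic
        match u.get? key with
        | some found => if found ≠ [] ∧ pvValV dic ≤ pvValV found then u else u.insert key dic
        | none => u.insert key dic) PySem.Dict.empty).values = _
  have hne : ∀ d ∈ PySem.List.sorted arr pvKeyT, d ≠ [] := by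
    intro d hd
    exact h d ((PySem.List.mem_sorted arr pvKeyT false d).mp hd)
  rw [foldA_eq_foldl_rrStep _ _ hne goodU_empty, values_foldl_rrStep]
  apply List.map_congr_left
  intro k _
  rw [selK_sorted]

-- B's inner scan is exactly the per-key selection selK
theorem innerScan_eq_selK (arr : List (List (String × Int))) (k : Int) :
    arr.foldl
      (fun (best : Option (List (String × Int))) dic =>
        if pvKeyT dic = k then
          match best with
          | none => some dic
          | some b => if pvValV b < pvValV dic then some dic else best
        else best)
      none = selK k none arr := by
  have hstep : (fun (best : Option (List (String × Int))) dic =>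
        if pvKeyT dic = k then
          match best with
          | none => some dic
          | some b => if pvValV b < pvValV dic then some dic else best
        else best) = selStep k := by
    funext o d
    unfold selStep updV
    by_cases hk : pvKeyT d = k
    · cases o <;> simp [hk]
    · simp [hk]
  rw [hstep]; rfl

-- B's outer loop appends one representative per key: it is a map over the key list
theorem foldl_append_eq_map (g : Int → List (String × Int)) (ks : List Int) :
    ∀ (acc : List (List (String × Int))),
      ks.foldl (fun result k => result ++ [g k]) acc = acc ++ ks.map g := by
  induction ks with
  | nil => intro acc; simp
  | cons k t ih => intro acc; simp [List.foldl_cons, ih]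

theorem RoadRunner_alt_eq_canon (arr : List (List (String × Int))) :
    RoadRunner_alt arr
      = (PySem.List.sorted (PySem.Set.ofList (arr.map pvKeyT)) (fun k => k)).map
          (fun k => (selK k none arr).getD []) := by
  unfold RoadRunner_alt
  simp only [innerScan_eq_selK]
  exact (foldl_append_eq_map _ _ []).trans (by simp)

-- the sorted distinct keys coincide with the dict's key list of A
theorem sortedKeys_eq_fkeys (arr : List (List (String × Int))) :
    PySem.List.sorted (PySem.Set.ofList (arr.map pvKeyT)) (fun k => k)
      = (PySem.List.sorted arr pvKeyT).foldl fkeysStep [] := by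
  set KS := (PySem.List.sorted arr pvKeyT).foldl fkeysStep [] with hKS
  have hKSnd : KS.Nodup := nodup_foldl_fkeysStep _ [] List.nodup_nil
  have hOnd : (PySem.Set.ofList (arr.map pvKeyT) : List Int).Nodup := PySem.Set.nodup_ofList _
  have hperm : KS.Perm (PySem.Set.ofList (arr.map pvKeyT)) := by
    rw [List.perm_ext_iff_of_nodup hKSnd hOnd]
    intro k
    rw [PySem.Set.mem_ofList, hKS, mem_foldl_fkeysStep]
    constructor
    · rintro (hh | hh)
      · simp at hh
      · obtain ⟨d, hd, rfl⟩ := List.mem_map.mp hh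
        exact List.mem_map_of_mem ((PySem.List.mem_sorted arr pvKeyT false d).mp hd)
    · intro hh
      obtain ⟨d, hd, rfl⟩ := List.mem_map.mp hh
      exact Or.inr (List.mem_map_of_mem ((PySem.List.mem_sorted arr pvKeyT false d).mpr hd))
  have hpw : KS.Pairwise (· < ·) := by
    apply pairwise_foldl_fkeysStep _ [] List.Pairwise.nil (by simp)
    exact PySem.List.sorted_map_key_pairwise arr pvKeyT
  exact PySem.List.sorted_eq_of_perm_of_pairwise_lt _ _ (fun k => k) hperm hpw

theorem rr_main (arr : List (List (String × Int))) (h : ∀ d ∈ arr, d ≠ []) :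
    RoadRunner arr = RoadRunner_alt arr := by
  rw [RoadRunner_eq_canon arr h, RoadRunner_alt_eq_canon arr, sortedKeys_eq_fkeys]

-- ===== VERDICT (by name: the statement is the Claim_ definition above) =====
theorem RoadRunner_spec : Claim_equal_RoadRunner := by
  intro arr _hdom hpre
  unfold Spec_RoadRunner
  have h : ∀ d ∈ arr, d ≠ [] := fun d hd => hasT_ne_nil d (hpre d hd).1
  exact rr_main arr h
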